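-- pv_equiv track=rewrite | github.com/6vetlio/Jeravis | assistant_gui.py | parse_multiple_actions
-- ===== SOURCE A (Python) =====
-- def parse_multiple_actions(response: str) -> list:
--     """Extract multiple PC_ACTION tags from response"""
--     actions = []
--     lines = response.split('\n')
--
--     for line in lines:
--         if '[PC_ACTION]:' in line:
--             idx = line.index('[PC_ACTION]:')
--             command = line[idx + len('[PC_ACTION]:'):].strip()
--             if command:
--                 actions.append(command)
--
--     return actions
-- ===== SOURCE B (Python) =====
-- import re
--
-- _TAG_RE = re.compile(r'\[PC_ACTION\]:(.*)')
--
-- def parse_multiple_actions(response: str) -> list: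
--     """Extract multiple PC_ACTION tags from response (one regex pass)."""
--     return [c.strip() for c in _TAG_RE.findall(response) if c.strip()]
-- ===== Notes on version B (the rewrite author's own statement) =====
-- stated objective: idiomatic
-- what changed: Replaced the split-into-lines loop with manual substring indexing and slicing by a single regex pass: re.findall(r'\[PC_ACTION\]:(.*)') (non-DOTALL, so a capture stops at end of line and the scan resumes past it) followed by a strip-and-filter comprehension.
import Mathlib
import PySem

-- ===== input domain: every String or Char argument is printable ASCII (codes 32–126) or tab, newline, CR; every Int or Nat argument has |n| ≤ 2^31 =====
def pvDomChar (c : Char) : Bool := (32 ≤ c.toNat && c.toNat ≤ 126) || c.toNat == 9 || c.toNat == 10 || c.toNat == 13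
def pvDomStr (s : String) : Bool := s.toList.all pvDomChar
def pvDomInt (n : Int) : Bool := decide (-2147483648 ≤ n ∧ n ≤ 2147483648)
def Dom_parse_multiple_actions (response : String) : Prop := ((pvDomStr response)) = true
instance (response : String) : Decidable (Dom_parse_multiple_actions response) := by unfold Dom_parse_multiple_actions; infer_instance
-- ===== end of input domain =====

-- B replaces A's split-into-lines-and-index loop by a single regex-style scan
-- (re.findall(r'\[PC_ACTION\]:(.*)')) followed by strip-and-filter; objective: more idiomatic, same cost.

-- ===== PORT A =====
-- A: split on '\n'; per line, if the tag occurs, take everything after its first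
-- occurrence (line.index = Chars.find, valid under the 'in' guard), strip, keep if nonempty.
-- len('[PC_ACTION]:') = 12.
def parse_multiple_actions (response : String) : List String :=
  (PySem.Chars.splitOn response.toList "\n".toList).foldl
    (fun actions line =>
      if PySem.Chars.isIn "[PC_ACTION]:".toList line then
        let idx := PySem.Chars.find line "[PC_ACTION]:".toList
        let command := PySem.Chars.strip (PySem.Chars.slice line (some (idx + 12)) none)
        if command ≠ [] then actions ++ [String.ofList command] else actions
      else actions)
    []

-- ===== PORT B =====
-- hand port of re.findall(r'\[PC_ACTION\]:(.*)', s): try each position left to right;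
-- on a literal-tag match the group `.*` greedily takes the rest of the line (non-DOTALL:
-- stops before '\n'), and the scan resumes after the match (non-overlapping). Exact.
def pvFindall (cs : List Char) : List (List Char) :=
  if "[PC_ACTION]:".toList.isPrefixOf cs then
    let rest := cs.drop 12
    rest.takeWhile (· ≠ '\n') :: pvFindall (rest.dropWhile (· ≠ '\n'))
  else
    match cs with
    | [] => []
    | _ :: cs' => pvFindall cs'
termination_by cs.length
decreasing_by
  · rename_i h
    have h1 := List.isPrefixOf_iff_prefix.mp h
    have h2 := h1.length_le
    have h3 := List.length_dropWhile_le (p := fun c => decide (c ≠ '\n')) (l := cs.drop 12)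
    have h4 : "[PC_ACTION]:".toList.length = 12 := by decide
    simp only [List.length_drop] at *
    omega
  · simp

-- the list comprehension: strip each capture, keep the truthy (nonempty) ones
def parse_multiple_actions_alt (response : String) : List String :=
  (pvFindall response.toList).filterMap (fun c =>
    let s := PySem.Chars.strip c
    if s ≠ [] then some (String.ofList s) else none)

-- ===== PRECONDITION & SPEC =====
def Spec_parse_multiple_actions (response : String) (out : List String) : Prop := out = parse_multiple_actions_alt response
instance (response : String) (out : List String) : Decidable (Spec_parse_multiple_actions response out) := by unfold Spec_parse_multiple_actions; infer_instance

-- ===== CLAIM (what is proved, stated in full; the proofs are below) =====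
def Claim_equal_parse_multiple_actions : Prop := ∀ (response : String), Dom_parse_multiple_actions response → Spec_parse_multiple_actions response (parse_multiple_actions response)

-- ===== LEMMAS AND PROOFS =====

def pvTag : List Char := "[PC_ACTION]:".toList

theorem pvFindall_nil : pvFindall [] = [] := by
  rw [pvFindall.eq_def]; rfl

theorem pvFindall_neg {c : Char} {cs' : List Char}
    (h : "[PC_ACTION]:".toList.isPrefixOf (c :: cs') = false) :
    pvFindall (c :: cs') = pvFindall cs' := by
  rw [pvFindall.eq_def, if_neg (by rw [h]; simp)]

theorem pvFindall_pos {cs : List Char} (h : "[PC_ACTION]:".toList.isPrefixOf cs = true) :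
    pvFindall cs =
      (cs.drop 12).takeWhile (· ≠ '\n') :: pvFindall ((cs.drop 12).dropWhile (· ≠ '\n')) := by
  rw [pvFindall.eq_def, if_pos h]

-- structural recursion equivalent of PySem.Chars.splitOn · ['\n']
def pvSplitNl : List Char → List (List Char)
  | [] => [[]]
  | c :: cs => if c = '\n' then [] :: pvSplitNl cs else (pvSplitNl cs).modifyHead (c :: ·)

theorem pvSplitNl_ne_nil (cs : List Char) : pvSplitNl cs ≠ [] := by
  induction cs with
  | nil => simp [pvSplitNl]
  | cons c cs ih =>
    simp only [pvSplitNl]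
    split_ifs
    · simp
    · cases h : pvSplitNl cs with
      | nil => exact absurd h ih
      | cons x xs => simp

theorem pv_go_eq : ∀ (fuel : Nat) (l cur : List Char) (acc : List (List Char)), l.length < fuel →
    PySem.Chars.splitOn.go ['\n'] fuel l cur acc =
      acc.reverse ++ (pvSplitNl l).modifyHead (cur.reverse ++ ·) := by
  intro fuel
  induction fuel with
  | zero => intro l cur acc h; omega
  | succ f ih =>
    intro l cur acc h
    cases l with
    | nil => simp [PySem.Chars.splitOn.go, pvSplitNl]
    | cons c rest =>
      by_cases hc : c = '\n'
      · subst hc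
        have hpre : List.isPrefixOf ['\n'] ('\n' :: rest) = true := by
          simp [List.isPrefixOf]
        simp only [PySem.Chars.splitOn.go, hpre, if_true, List.length_cons,
          List.length_nil, List.drop_succ_cons, List.drop_zero]
        rw [ih rest [] (cur.reverse :: acc) (by simp at h; omega)]
        simp [pvSplitNl]
        cases hs : pvSplitNl rest with
        | nil => exact absurd hs (pvSplitNl_ne_nil rest)
        | cons x xs => simp
      · have hpre : List.isPrefixOf ['\n'] (c :: rest) = false := by
          simp [List.isPrefixOf]; intro hh; exact absurd hh.symm hc
        simp only [PySem.Chars.splitOn.go, hpre]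
        rw [if_neg (by simp)]
        rw [ih rest (c :: cur) acc (by simp at h ⊢; omega)]
        simp only [pvSplitNl, if_neg hc]
        cases hs : pvSplitNl rest with
        | nil => exact absurd hs (pvSplitNl_ne_nil rest)
        | cons x xs => simp

theorem pvSplitOn_eq (cs : List Char) : PySem.Chars.splitOn cs "\n".toList = pvSplitNl cs := by
  have : "\n".toList = ['\n'] := rfl
  rw [this, PySem.Chars.splitOn, pv_go_eq (cs.length + 1) cs [] [] (by omega)]
  cases hs : pvSplitNl cs with
  | nil => exact absurd hs (pvSplitNl_ne_nil cs)
  | cons x xs => simp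

-- lines after the first, as a function of the dropWhile remainder
def pvTailLines : List Char → List (List Char)
  | [] => []
  | _ :: t => pvSplitNl t

theorem pvSplitNl_struct (cs : List Char) :
    pvSplitNl cs = cs.takeWhile (· ≠ '\n') :: pvTailLines (cs.dropWhile (· ≠ '\n')) := by
  induction cs with
  | nil => simp [pvSplitNl, pvTailLines]
  | cons c cs ih =>
    by_cases hc : c = '\n'
    · subst hc; simp [pvSplitNl, pvTailLines]
    · simp only [pvSplitNl, if_neg hc, ih, List.modifyHead_cons,
        List.takeWhile_cons, List.dropWhile_cons]
      simp [hc]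

theorem pv_find_go_shift (l : List Char) : ∀ (k : Nat),
    PySem.Chars.find.go pvTag l (k + 1) =
      if PySem.Chars.find.go pvTag l k = -1 then -1 else PySem.Chars.find.go pvTag l k + 1 := by
  induction l with
  | nil =>
    intro k
    have : pvTag.isEmpty = false := by decide
    simp [PySem.Chars.find.go, this]
  | cons c t ih =>
    intro k
    by_cases hp : pvTag.isPrefixOf (c :: t)
    · simp only [PySem.Chars.find.go, hp, if_true]
      rw [if_neg (by omega)]
      omega
    · simp only [PySem.Chars.find.go, hp, Bool.false_eq_true, if_false]
      exact ih (k + 1)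

theorem pv_find_cons {c : Char} {l : List Char} (h : pvTag.isPrefixOf (c :: l) = false) :
    PySem.Chars.find (c :: l) pvTag =
      if PySem.Chars.find l pvTag = -1 then -1 else PySem.Chars.find l pvTag + 1 := by
  simp only [PySem.Chars.find]
  rw [show PySem.Chars.find.go pvTag (c :: l) 0 = PySem.Chars.find.go pvTag l 1 by
    simp [PySem.Chars.find.go, h]]
  exact pv_find_go_shift l 0

theorem pv_find_of_prefix {l : List Char} (h : pvTag.isPrefixOf l = true) :
    PySem.Chars.find l pvTag = 0 := by
  cases l with
  | nil => exact absurd h (by decide)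
  | cons c t => simp [PySem.Chars.find, PySem.Chars.find.go, h]

-- what A contributes per line, before strip/filter: the suffix after the first tag
def pvLineAct (l : List Char) : List (List Char) :=
  if PySem.Chars.isIn pvTag l then [l.drop ((PySem.Chars.find l pvTag).toNat + 12)] else []

theorem pv_takeWhile_tag (r : List Char) :
    (pvTag ++ r).takeWhile (· ≠ '\n') = pvTag ++ r.takeWhile (· ≠ '\n') := by
  rw [List.takeWhile_append, if_pos (by decide)]

theorem pv_dropWhile_tag (r : List Char) :
    (pvTag ++ r).dropWhile (· ≠ '\n') = r.dropWhile (· ≠ '\n') := by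
  rw [List.dropWhile_append, if_pos (by decide)]

theorem pv_dropWhile_cons_head {r t : List Char} {x : Char} {p : Char → Bool}
    (hs : r.dropWhile p = x :: t) : p x = false := by
  induction r with
  | nil => simp at hs
  | cons c cs ih =>
    rw [List.dropWhile_cons] at hs
    split_ifs at hs with h
    · exact ih hs
    · rw [List.cons.injEq] at hs
      rw [← hs.1]
      simpa using h

theorem pv_main_aux : ∀ (n : Nat) (cs : List Char), cs.length ≤ n →
    pvFindall cs = (pvSplitNl cs).flatMap pvLineAct := by
  intro n
  induction n with
  | zero =>
    intro cs h
    have : cs = [] := by cases cs <;> simp_all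
    subst this
    rw [pvFindall_nil]
    simp [pvSplitNl]
    decide
  | succ n ih =>
    intro cs hlen
    by_cases hp : "[PC_ACTION]:".toList.isPrefixOf cs
    · -- tag at position 0: the scanner captures the rest of the line
      obtain ⟨r, hr⟩ : ∃ r, cs = pvTag ++ r := by
        obtain ⟨r, hr⟩ := List.isPrefixOf_iff_prefix.mp hp
        exact ⟨r, hr.symm⟩
      subst hr
      rw [pvFindall_pos hp]
      have hdrop : (pvTag ++ r).drop 12 = r := by
        rw [show (12 : Nat) = pvTag.length by decide]
        exact List.drop_left
      rw [hdrop]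
      -- split side
      rw [pvSplitNl_struct, pv_takeWhile_tag, pv_dropWhile_tag]
      have hline : pvLineAct (pvTag ++ r.takeWhile (· ≠ '\n')) = [r.takeWhile (· ≠ '\n')] := by
        have hpre : pvTag.isPrefixOf (pvTag ++ r.takeWhile (· ≠ '\n')) = true :=
          List.isPrefixOf_iff_prefix.mpr (List.prefix_append _ _)
        have hf := pv_find_of_prefix hpre
        have hin : PySem.Chars.isIn pvTag (pvTag ++ r.takeWhile (· ≠ '\n')) = true := by
          rw [PySem.Chars.isIn, hf]; decide
        simp only [pvLineAct, hin, if_true, hf]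
        rw [show ((0 : Int).toNat + 12) = pvTag.length by decide, List.drop_left]
      rw [List.flatMap_cons, hline]
      cases hs : r.dropWhile (· ≠ '\n') with
      | nil => rw [pvFindall_nil]; simp [pvTailLines]
      | cons x t =>
        have hx : x = '\n' := by
          have := pv_dropWhile_cons_head hs
          simpa using this
        subst hx
        rw [pvFindall_neg (c := '\n') (by simp [List.isPrefixOf])]
        have hlt : t.length ≤ n := by
          have h1 := List.length_dropWhile_le (p := fun c => decide (c ≠ '\n')) (l := r)
          rw [hs] at h1
          simp at h1
          simp [pvTag] at hlen
          omega
        rw [ih t hlt]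
        simp [pvTailLines]
    · cases cs with
      | nil =>
        rw [pvFindall_nil]
        simp [pvSplitNl]
        decide
      | cons c cs' =>
        rw [pvFindall_neg (eq_false_of_ne_true hp)]
        rw [ih cs' (by simp at hlen; omega)]
        by_cases hc : c = '\n'
        · subst hc
          rw [show pvSplitNl ('\n' :: cs') = [] :: pvSplitNl cs' by simp [pvSplitNl]]
          rw [List.flatMap_cons]
          rw [show pvLineAct [] = [] by decide]
          simp
        · rw [show pvSplitNl (c :: cs') = (pvSplitNl cs').modifyHead (c :: ·) by
            simp [pvSplitNl, hc]]
          rw [pvSplitNl_struct (cs := cs')]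
          rw [List.modifyHead_cons, List.flatMap_cons, List.flatMap_cons]
          congr 1
          -- the tag does not start at position 0 of the (extended) first line
          have hpl : pvTag.isPrefixOf (c :: cs'.takeWhile (· ≠ '\n')) = false := by
            by_contra hcon
            rw [Bool.not_eq_false] at hcon
            apply hp
            have h1 : (c :: cs'.takeWhile (· ≠ '\n')) <+: (c :: cs') := by
              exact List.cons_prefix_cons.mpr ⟨rfl, List.takeWhile_prefix _⟩
            exact List.isPrefixOf_iff_prefix.mpr
              ((List.isPrefixOf_iff_prefix.mp hcon).trans h1)
          set l := cs'.takeWhile (· ≠ '\n') with hl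
          by_cases hfind : PySem.Chars.find l pvTag = -1
          · have h1 : PySem.Chars.find (c :: l) pvTag = -1 := by
              rw [pv_find_cons hpl, if_pos hfind]
            simp [pvLineAct, PySem.Chars.isIn, h1, hfind]
          · have hge : 0 ≤ PySem.Chars.find l pvTag := by
              have := PySem.Chars.neg_one_le_find (s := l) (sub := pvTag)
              omega
            have h1 : PySem.Chars.find (c :: l) pvTag = PySem.Chars.find l pvTag + 1 := by
              rw [pv_find_cons hpl, if_neg hfind]
            have h3 : pvLineAct (c :: l) = [List.drop ((PySem.Chars.find l pvTag).toNat + 12) l] := by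
              simp only [pvLineAct, PySem.Chars.isIn, h1]
              rw [if_pos (by simp only [bne_iff_ne, ne_eq]; omega)]
              congr 1
              have ht : (PySem.Chars.find l pvTag + 1).toNat + 12
                  = ((PySem.Chars.find l pvTag).toNat + 12) + 1 := by omega
              rw [ht, List.drop_succ_cons]
            have h4 : pvLineAct l = [List.drop ((PySem.Chars.find l pvTag).toNat + 12) l] := by
              simp only [pvLineAct, PySem.Chars.isIn]
              rw [if_pos (by simp only [bne_iff_ne, ne_eq]; omega)]
            rw [h3, h4]

-- A's foldl, unrolled to a flatMap
theorem pv_foldl_eq (lines : List (List Char)) (init : List String) :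
    lines.foldl
      (fun actions line =>
        if PySem.Chars.isIn "[PC_ACTION]:".toList line then
          let idx := PySem.Chars.find line "[PC_ACTION]:".toList
          let command := PySem.Chars.strip (PySem.Chars.slice line (some (idx + 12)) none)
          if command ≠ [] then actions ++ [String.ofList command] else actions
        else actions) init =
    init ++ lines.flatMap (fun line =>
        if PySem.Chars.isIn pvTag line then
          let command := PySem.Chars.strip
            (PySem.Chars.slice line (some (PySem.Chars.find line pvTag + 12)) none)
          if command ≠ [] then [String.ofList command] else []
        else []) := by
  induction lines generalizing init with
  | nil => simp
  | cons l ls ih =>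
    rw [List.foldl_cons, List.flatMap_cons, ih]
    show _ = init ++ (_ ++ _)
    by_cases h : PySem.Chars.isIn pvTag l
    · simp only [pvTag] at h ⊢
      simp only [h, if_true]
      split_ifs <;> simp
    · simp only [pvTag] at h ⊢
      simp only [h]
      simp

-- per line, A's strip-and-keep of the post-tag slice = B's strip-and-filter of the capture
theorem pv_line_eq (l : List Char) :
    (pvLineAct l).filterMap (fun c =>
        let s := PySem.Chars.strip c
        if s ≠ [] then some (String.ofList s) else none) =
    (if PySem.Chars.isIn pvTag l then
        let command := PySem.Chars.strip
          (PySem.Chars.slice l (some (PySem.Chars.find l pvTag + 12)) none)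
        if command ≠ [] then [String.ofList command] else []
      else []) := by
  by_cases h : PySem.Chars.isIn pvTag l
  · have hge : 0 ≤ PySem.Chars.find l pvTag := by
      have h1 := PySem.Chars.neg_one_le_find (s := l) (sub := pvTag)
      have h2 : PySem.Chars.find l pvTag ≠ -1 := by
        simpa [PySem.Chars.isIn] using h
      omega
    have hslice : PySem.Chars.slice l (some (PySem.Chars.find l pvTag + 12)) none
        = l.drop ((PySem.Chars.find l pvTag).toNat + 12) := by
      rw [PySem.Chars.slice_eq_listSlice]
      rw [show PySem.Chars.find l pvTag + 12 = (((PySem.Chars.find l pvTag).toNat + 12 : Nat) : Int) by omega]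
      exact PySem.List.slice_from_natCast l _
    simp only [pvLineAct, h, if_true, List.filterMap_cons, List.filterMap_nil, hslice]
    split_ifs <;> simp_all
  · simp [pvLineAct, h]

-- ===== VERDICT (by name: the statement is the Claim_ definition above) =====
theorem parse_multiple_actions_spec : Claim_equal_parse_multiple_actions := by
  intro response _
  unfold Spec_parse_multiple_actions parse_multiple_actions parse_multiple_actions_alt
  rw [pvSplitOn_eq, pv_foldl_eq, List.nil_append,
    pv_main_aux (response.toList.length) response.toList le_rfl,
    List.filterMap_flatMap]
  exact List.flatMap_congr (fun l _ => (pv_line_eq l).symm)
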